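-- pv_equiv track=rewrite | github.com/losa201/Xorb | src/api/app/services/ptaas_orchestrator_service.py | _identify_db_compliance_gaps
-- ===== SOURCE A (Python) =====
-- from typing import Dict, List, Optional, Any, Union, Callable
--
-- def _identify_db_compliance_gaps(db_issues: List[Dict[str, Any]]) -> Dict[str, List[str]]:
--     """Identify database compliance gaps"""
--     compliance_gaps = {
--         "pci_dss": [],
--         "hipaa": [],
--         "sox": [],
--         "gdpr": []
--     }
--
--     for issue in db_issues:
--         issue_type = issue.get("type", "").lower()
--         severity = issue.get("severity", "").lower()
--
--         # PCI-DSS requirements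
--         if "encryption" in issue_type or "weak auth" in issue_type:
--             compliance_gaps["pci_dss"].append(f"PCI-DSS 3.4: {issue.get('description')}")
--
--         # HIPAA requirements
--         if "encryption" in issue_type or "access" in issue_type:
--             compliance_gaps["hipaa"].append(f"HIPAA 164.312: {issue.get('description')}")
--
--         # SOX requirements
--         if "access" in issue_type or "audit" in issue_type:
--             compliance_gaps["sox"].append(f"SOX 404: {issue.get('description')}")
--
--         # GDPR requirements
--         if "encryption" in issue_type or "access" in issue_type:
--             compliance_gaps["gdpr"].append(f"GDPR Art. 32: {issue.get('description')}")
--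
--     return compliance_gaps
-- ===== SOURCE B (Python) =====
-- _RULES = [
--     ("pci_dss", "PCI-DSS 3.4", ("encryption", "weak auth")),
--     ("hipaa", "HIPAA 164.312", ("encryption", "access")),
--     ("sox", "SOX 404", ("access", "audit")),
--     ("gdpr", "GDPR Art. 32", ("encryption", "access")),
-- ]
--
--
-- def _identify_db_compliance_gaps(db_issues):
--     """Identify database compliance gaps (rule-table version)."""
--     return {
--         std: [
--             f"{prefix}: {issue.get('description')}"
--             for issue in db_issues
--             if any(t in issue.get("type", "").lower() for t in triggers)
--         ]
--         for std, prefix, triggers in _RULES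
--     }
-- ===== Notes on version B (the rewrite author's own statement) =====
-- stated objective: simpler
-- what changed: Replaced the single pass with four per-standard append branches by a declarative rule table (standard, label prefix, trigger substrings) and one dict comprehension that scans the issues once per standard (loops transposed).
import Mathlib
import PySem

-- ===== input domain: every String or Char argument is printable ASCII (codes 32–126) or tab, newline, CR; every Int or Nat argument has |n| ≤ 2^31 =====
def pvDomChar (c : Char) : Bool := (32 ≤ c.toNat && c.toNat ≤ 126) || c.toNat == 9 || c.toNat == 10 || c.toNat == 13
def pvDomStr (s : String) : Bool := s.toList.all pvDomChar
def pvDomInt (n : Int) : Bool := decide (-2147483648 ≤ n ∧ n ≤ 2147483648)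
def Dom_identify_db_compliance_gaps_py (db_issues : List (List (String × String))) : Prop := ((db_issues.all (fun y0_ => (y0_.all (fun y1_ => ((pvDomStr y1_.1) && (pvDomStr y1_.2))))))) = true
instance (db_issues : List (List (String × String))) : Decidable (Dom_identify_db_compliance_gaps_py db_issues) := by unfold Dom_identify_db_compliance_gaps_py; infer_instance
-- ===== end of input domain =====

-- B replaces A's single pass with four hand-written append branches by a declarative rule
-- table and one comprehension per standard (loops transposed); objective: simpler.

-- ===== PORT A =====

-- f"{x}" where x may be None: some s ↦ s, none ↦ "None"
def pvShowOptStrA (o : Option String) : String :=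
  match o with
  | some s => s
  | none => "None"

-- the body of A's for-loop, one issue at a time
def pvStepA (compliance_gaps : PySem.Dict String (List String)) (issue : List (String × String)) :
    PySem.Dict String (List String) :=
  let d : PySem.Dict String String := PySem.Dict.mk issue
  let issue_type := PySem.Str.lower (d.getD "type" "")
  let _severity := PySem.Str.lower (d.getD "severity" "")
  -- PCI-DSS requirements
  let compliance_gaps :=
    if PySem.Str.isIn "encryption" issue_type || PySem.Str.isIn "weak auth" issue_type then
      compliance_gaps.modify "pci_dss" [] (· ++ ["PCI-DSS 3.4: " ++ pvShowOptStrA (d.get? "description")])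
    else compliance_gaps
  -- HIPAA requirements
  let compliance_gaps :=
    if PySem.Str.isIn "encryption" issue_type || PySem.Str.isIn "access" issue_type then
      compliance_gaps.modify "hipaa" [] (· ++ ["HIPAA 164.312: " ++ pvShowOptStrA (d.get? "description")])
    else compliance_gaps
  -- SOX requirements
  let compliance_gaps :=
    if PySem.Str.isIn "access" issue_type || PySem.Str.isIn "audit" issue_type then
      compliance_gaps.modify "sox" [] (· ++ ["SOX 404: " ++ pvShowOptStrA (d.get? "description")])
    else compliance_gaps
  -- GDPR requirements
  let compliance_gaps :=
    if PySem.Str.isIn "encryption" issue_type || PySem.Str.isIn "access" issue_type then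
      compliance_gaps.modify "gdpr" [] (· ++ ["GDPR Art. 32: " ++ pvShowOptStrA (d.get? "description")])
    else compliance_gaps
  compliance_gaps

def identify_db_compliance_gaps_py (db_issues : List (List (String × String))) : List (String × List String) :=
  let compliance_gaps : PySem.Dict String (List String) :=
    PySem.Dict.mk [("pci_dss", []), ("hipaa", []), ("sox", []), ("gdpr", [])]
  (db_issues.foldl pvStepA compliance_gaps).items

-- ===== PORT B =====

def pvShowOptStrB (o : Option String) : String :=
  match o with
  | some s => s
  | none => "None"

-- the rule table: (standard, label prefix, trigger substrings)
def pvRules : List (String × String × List String) :=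
  [("pci_dss", "PCI-DSS 3.4", ["encryption", "weak auth"]),
   ("hipaa", "HIPAA 164.312", ["encryption", "access"]),
   ("sox", "SOX 404", ["access", "audit"]),
   ("gdpr", "GDPR Art. 32", ["encryption", "access"])]

-- the per-standard comprehension: filter by the trigger substrings, then format
def pvCollect (prefixLabel : String) (triggers : List String) (db_issues : List (List (String × String))) : List String :=
  (db_issues.filter (fun issue =>
      triggers.any (fun t => PySem.Str.isIn t (PySem.Str.lower ((PySem.Dict.mk issue).getD "type" ""))))).map
    (fun issue => prefixLabel ++ ": " ++ pvShowOptStrB ((PySem.Dict.mk issue).get? "description"))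

def identify_db_compliance_gaps_py_alt (db_issues : List (List (String × String))) : List (String × List String) :=
  pvRules.map (fun r => (r.1, pvCollect r.2.1 r.2.2 db_issues))

-- ===== PRECONDITION & SPEC =====
def Spec_identify_db_compliance_gaps_py (db_issues : List (List (String × String))) (out : List (String × List String)) : Prop := out = identify_db_compliance_gaps_py_alt db_issues
instance (db_issues : List (List (String × String))) (out : List (String × List String)) : Decidable (Spec_identify_db_compliance_gaps_py db_issues out) := by unfold Spec_identify_db_compliance_gaps_py; infer_instance

-- ===== CLAIM (what is proved, stated in full; the proofs are below) =====
def Claim_equal_identify_db_compliance_gaps_py : Prop := ∀ (db_issues : List (List (String × String))), Dom_identify_db_compliance_gaps_py db_issues → Spec_identify_db_compliance_gaps_py db_issues (identify_db_compliance_gaps_py db_issues)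

-- ===== LEMMAS AND PROOFS =====

-- one step of A's loop on the concrete 4-entry state, written as per-list appends
theorem pvStepA_mk (issue : List (String × String)) (a b c d : List String) :
    pvStepA (PySem.Dict.mk [("pci_dss", a), ("hipaa", b), ("sox", c), ("gdpr", d)]) issue =
    PySem.Dict.mk
      [("pci_dss", a ++ (if (["encryption", "weak auth"] : List String).any
            (fun t => PySem.Str.isIn t (PySem.Str.lower ((PySem.Dict.mk issue).getD "type" ""))) then
          ["PCI-DSS 3.4: " ++ pvShowOptStrB ((PySem.Dict.mk issue).get? "description")] else [])),
       ("hipaa", b ++ (if (["encryption", "access"] : List String).any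
            (fun t => PySem.Str.isIn t (PySem.Str.lower ((PySem.Dict.mk issue).getD "type" ""))) then
          ["HIPAA 164.312: " ++ pvShowOptStrB ((PySem.Dict.mk issue).get? "description")] else [])),
       ("sox", c ++ (if (["access", "audit"] : List String).any
            (fun t => PySem.Str.isIn t (PySem.Str.lower ((PySem.Dict.mk issue).getD "type" ""))) then
          ["SOX 404: " ++ pvShowOptStrB ((PySem.Dict.mk issue).get? "description")] else [])),
       ("gdpr", d ++ (if (["encryption", "access"] : List String).any
            (fun t => PySem.Str.isIn t (PySem.Str.lower ((PySem.Dict.mk issue).getD "type" ""))) then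
          ["GDPR Art. 32: " ++ pvShowOptStrB ((PySem.Dict.mk issue).get? "description")] else []))] := by
  unfold pvStepA
  split_ifs <;>
    simp_all [PySem.Dict.modify, PySem.Dict.insert, PySem.Dict.contains, PySem.Dict.getD,
      PySem.Dict.get?, pvShowOptStrA, pvShowOptStrB]

-- the loop invariant: A's fold over any 4-entry state accumulates exactly B's per-standard lists
theorem pv_loop_invariant (db_issues : List (List (String × String))) (a b c d : List String) :
    db_issues.foldl pvStepA (PySem.Dict.mk [("pci_dss", a), ("hipaa", b), ("sox", c), ("gdpr", d)]) =
    PySem.Dict.mk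
      [("pci_dss", a ++ pvCollect "PCI-DSS 3.4" ["encryption", "weak auth"] db_issues),
       ("hipaa", b ++ pvCollect "HIPAA 164.312" ["encryption", "access"] db_issues),
       ("sox", c ++ pvCollect "SOX 404" ["access", "audit"] db_issues),
       ("gdpr", d ++ pvCollect "GDPR Art. 32" ["encryption", "access"] db_issues)] := by
  induction db_issues generalizing a b c d with
  | nil => simp [pvCollect]
  | cons issue rest ih =>
    rw [List.foldl_cons, pvStepA_mk, ih]
    simp only [pvCollect, List.filter_cons]
    split_ifs <;> simp_all

-- ===== VERDICT (by name: the statement is the Claim_ definition above) =====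
theorem identify_db_compliance_gaps_py_spec : Claim_equal_identify_db_compliance_gaps_py := by
  intro db_issues _
  unfold Spec_identify_db_compliance_gaps_py identify_db_compliance_gaps_py identify_db_compliance_gaps_py_alt
  simp only [pv_loop_invariant]
  simp [pvRules]
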